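-- pv_equiv track=rewrite | github.com/yeshuawatso/bc250 | netscan/queue-runner.py | build_batch_queue
-- ===== SOURCE A (Python) =====
-- def build_batch_queue(batch_jobs, weekly_jobs):
--     """
--     Build the sequential batch queue.
--     Order: infra → scrape → company → career → repo → lore → other → weekly
--     Scrape-only jobs (-scrape suffix) run early to produce raw data.
--     Analyze-only jobs (-analyze suffix) run in their normal category after scrape.
--     """
--     blocks = {
--         'infra': [],
--         'scrape': [],       # *-scrape jobs: data gathering, no LLM
--         'company': [],
--         'career': [],
--         'repo-scan': [],    # repo-scan-* → data collection first
--         'repo-think': [],   # repo-think-* → LLM analysis after scans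
--         'repo-other': [],   # other repo-* jobs
--         'lore': [],
--         'academic': [],     # academic-watch-* → publications, dissertations, patents
--         'other': [],
--     }
--
--     for job in batch_jobs:
--         name = job['name']
--         # Route scrape-only jobs to early scrape block
--         if name.endswith('-scrape'):
--             blocks['scrape'].append(job)
--         elif name.startswith('netscan') or name.startswith('leak-') or \
--            name == 'event-scout' or name.startswith('radio-scan') or \
--            name == 'watchdog':
--             blocks['infra'].append(job)
--         elif name.startswith('company-'):
--             blocks['company'].append(job)
--         elif name.startswith('career-'):
--             blocks['career'].append(job)
--         elif name.startswith('repo-scan-') or name == 'repo-digest':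
--             blocks['repo-scan'].append(job)
--         elif name.startswith('repo-think-'):
--             blocks['repo-think'].append(job)
--         elif name.startswith('repo-') or name == 'salary-tracker':
--             blocks['repo-other'].append(job)
--         elif name.startswith('lore-'):
--             blocks['lore'].append(job)
--         elif name.startswith('academic-'):
--             blocks['academic'].append(job)
--         else:
--             blocks['other'].append(job)
--
--     for block in blocks.values():
--         block.sort(key=lambda j: j['name'])
--
--     # Sort repo-think so summary always comes last
--     blocks['repo-think'].sort(key=lambda j: (
--         1 if j['name'] == 'repo-think-summary' else 0,
--         j['name']
--     ))
--
--     # Sort company/career: main analysis first, focused second, summary last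
--     for bk in ('company', 'career'):
--         blocks[bk].sort(key=lambda j: (
--             2 if 'summary' in j['name'] else (1 if j['name'].count('-') > 2 else 0),
--             j['name']
--         ))
--
--     queue = []
--
--     # ── Priority 0: Scrape-only (data gathering, no LLM, produces raw-*.json) ──
--     queue.extend(blocks['scrape'])
--
--     # ── Priority 1: Infra (data gathering, no LLM needed, fast ~35min) ──
--     queue.extend(blocks['infra'])
--
--     # ── Priority 2: Quick data (moderate, ~1-2h) ──
--     queue.extend(blocks['academic'])
--     queue.extend(blocks['repo-other'])  # salary-tracker etc.
--     queue.extend(blocks['other'])       # car-tracker, city-watch, csi-sensor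
--
--     # ── Priority 3: Think + analysis (the user's priority!) ──
--     # Think jobs use data from PREVIOUS nights. Getting them done early
--     # ensures the dashboard has fresh analysis every morning.
--     company_main = [j for j in blocks['company'] if j['name'].count('-') <= 2]
--     company_deep = [j for j in blocks['company'] if j['name'].count('-') > 2]
--     career_main = [j for j in blocks['career']
--                    if j['name'].count('-') <= 2 or j['name'] == 'career-scan']
--     career_deep = [j for j in blocks['career'] if j['name'].count('-') > 2]
--
--     queue.extend(company_main)
--     queue.extend(career_main)
--     queue.extend(blocks['repo-think'])
--     queue.extend(company_deep)
--     queue.extend(career_deep)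
--
--     # ── Priority 4: Slow data gathering (feeds NEXT night's analysis) ──
--     # Lore digests and repo-scan are heavy (40min each for repo-scan,
--     # 10-30min each for lore). Placed last so they don't block think jobs.
--     queue.extend(blocks['lore'])
--     queue.extend(blocks['repo-scan'])
--
--     # Weekly at end of batch
--     queue.extend(sorted(weekly_jobs, key=lambda j: j['name']))
--
--     return queue
-- ===== SOURCE B (Python) =====
-- def build_batch_queue(batch_jobs, weekly_jobs):
--     """One stable global sort over batch_jobs keyed by (final-group rank, name),
--     then the name-sorted weekly jobs appended; no bucket lists, no re-sorts."""
--     def rank(name):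
--         if name.endswith('-scrape'):
--             return 0
--         if name.startswith('netscan') or name.startswith('leak-') or \
--            name == 'event-scout' or name.startswith('radio-scan') or \
--            name == 'watchdog':
--             return 1
--         if name.startswith('company-'):
--             return (11 if name.count('-') > 2 else 5) + (1 if 'summary' in name else 0)
--         if name.startswith('career-'):
--             return (13 if name.count('-') > 2 else 7) + (1 if 'summary' in name else 0)
--         if name.startswith('repo-scan-') or name == 'repo-digest':
--             return 16
--         if name.startswith('repo-think-'):
--             return 10 if name == 'repo-think-summary' else 9
--         if name.startswith('repo-') or name == 'salary-tracker':
--             return 3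
--         if name.startswith('lore-'):
--             return 15
--         if name.startswith('academic-'):
--             return 2
--         return 4
--     return sorted(batch_jobs, key=lambda j: (rank(j['name']), j['name'])) + \
--            sorted(weekly_jobs, key=lambda j: j['name'])
-- ===== Notes on version B (the rewrite author's own statement) =====
-- stated objective: simpler
-- what changed: A routes jobs into ten named bucket lists, sorts each bucket, re-sorts company/career/repo-think with composite keys, splits company/career into main/deep by a post-sort filter and hand-concatenates thirteen pieces; B computes one rank(name) integer encoding the final output group (0-16) and returns a single stable sort of batch_jobs keyed by (rank, name) followed by the name-sorted weekly jobs.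
import Mathlib
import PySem

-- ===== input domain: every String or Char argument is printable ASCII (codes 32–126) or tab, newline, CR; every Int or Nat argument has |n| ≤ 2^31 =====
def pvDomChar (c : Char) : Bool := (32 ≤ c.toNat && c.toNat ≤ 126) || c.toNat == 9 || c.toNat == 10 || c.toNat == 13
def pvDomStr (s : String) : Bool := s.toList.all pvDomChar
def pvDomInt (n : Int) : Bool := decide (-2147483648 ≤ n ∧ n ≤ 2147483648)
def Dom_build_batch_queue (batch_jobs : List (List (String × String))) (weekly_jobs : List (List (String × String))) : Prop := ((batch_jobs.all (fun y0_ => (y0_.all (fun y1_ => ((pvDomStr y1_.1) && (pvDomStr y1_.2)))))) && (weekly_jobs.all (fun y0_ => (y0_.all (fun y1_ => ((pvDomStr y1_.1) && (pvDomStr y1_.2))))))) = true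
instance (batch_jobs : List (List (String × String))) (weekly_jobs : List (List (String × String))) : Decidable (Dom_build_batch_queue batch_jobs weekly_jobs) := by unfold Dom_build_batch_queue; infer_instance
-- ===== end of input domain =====

-- B replaces A's named bucket lists, per-bucket sorts and hand-written concatenation by ONE stable
-- sort of batch_jobs keyed by (final-group rank, name) plus the name-sorted weekly jobs (objective:
-- simpler).  Equivalence is about the return value only (A sorts its internal bucket lists in place;
-- neither version observably mutates its arguments).

-- job['name']  (jobs are Python dicts; Pre_ guarantees the "name" key is present, so getD is exact)
def pvName (j : List (String × String)) : String := PySem.Dict.getD ⟨j⟩ "name" ""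

-- ===== PORT A =====
-- A's 'blocks' dict has ten FIXED literal keys, so it is ported as a ten-field record
-- (exact: the keys are static, insertion/iteration order never matters for the value).
structure PvBlocks : Type where
  infra : List (List (String × String))
  scrape : List (List (String × String))
  company : List (List (String × String))
  career : List (List (String × String))
  repoScan : List (List (String × String))
  repoThink : List (List (String × String))
  repoOther : List (List (String × String))
  lore : List (List (String × String))
  academic : List (List (String × String))
  other : List (List (String × String))

-- the body of A's routing loop (the if/elif chain, in A's order)
def pvRoute (b : PvBlocks) (job : List (String × String)) : PvBlocks :=
  let name := pvName job
  if PySem.Str.endswith name "-scrape" then { b with scrape := b.scrape ++ [job] }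
  else if PySem.Str.startswith name "netscan" || PySem.Str.startswith name "leak-" ||
      name == "event-scout" || PySem.Str.startswith name "radio-scan" || name == "watchdog" then
    { b with infra := b.infra ++ [job] }
  else if PySem.Str.startswith name "company-" then { b with company := b.company ++ [job] }
  else if PySem.Str.startswith name "career-" then { b with career := b.career ++ [job] }
  else if PySem.Str.startswith name "repo-scan-" || name == "repo-digest" then
    { b with repoScan := b.repoScan ++ [job] }
  else if PySem.Str.startswith name "repo-think-" then { b with repoThink := b.repoThink ++ [job] }
  else if PySem.Str.startswith name "repo-" || name == "salary-tracker" then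
    { b with repoOther := b.repoOther ++ [job] }
  else if PySem.Str.startswith name "lore-" then { b with lore := b.lore ++ [job] }
  else if PySem.Str.startswith name "academic-" then { b with academic := b.academic ++ [job] }
  else { b with other := b.other ++ [job] }

-- A's company/career re-sort primary key: 2 if 'summary' in name else (1 if name.count('-') > 2 else 0)
def pvClsCC (name : String) : Int :=
  if PySem.Str.isIn "summary" name then 2 else if 2 < PySem.Str.count name "-" then 1 else 0

def build_batch_queue (batch_jobs : List (List (String × String))) (weekly_jobs : List (List (String × String))) : List (List (String × String)) :=
  let b := batch_jobs.foldl pvRoute ⟨[], [], [], [], [], [], [], [], [], []⟩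
  -- for block in blocks.values(): block.sort(key=lambda j: j['name'])
  let infra := PySem.List.sorted b.infra pvName
  let scrape := PySem.List.sorted b.scrape pvName
  let company := PySem.List.sorted b.company pvName
  let career := PySem.List.sorted b.career pvName
  let repoScan := PySem.List.sorted b.repoScan pvName
  let repoThink := PySem.List.sorted b.repoThink pvName
  let repoOther := PySem.List.sorted b.repoOther pvName
  let lore := PySem.List.sorted b.lore pvName
  let academic := PySem.List.sorted b.academic pvName
  let other := PySem.List.sorted b.other pvName
  -- repo-think re-sort: summary last
  let repoThink := PySem.List.sorted2 repoThink
    (fun j => if pvName j == "repo-think-summary" then (1 : Int) else 0) pvName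
  -- company/career re-sort: main first, focused second, summary last
  let company := PySem.List.sorted2 company (fun j => pvClsCC (pvName j)) pvName
  let career := PySem.List.sorted2 career (fun j => pvClsCC (pvName j)) pvName
  let company_main := company.filter (fun j => decide (PySem.Str.count (pvName j) "-" ≤ 2))
  let company_deep := company.filter (fun j => decide (2 < PySem.Str.count (pvName j) "-"))
  let career_main := career.filter
    (fun j => decide (PySem.Str.count (pvName j) "-" ≤ 2) || pvName j == "career-scan")
  let career_deep := career.filter (fun j => decide (2 < PySem.Str.count (pvName j) "-"))
  scrape ++ infra ++ academic ++ repoOther ++ other ++ company_main ++ career_main ++ repoThink ++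
    company_deep ++ career_deep ++ lore ++ repoScan ++ PySem.List.sorted weekly_jobs pvName

-- ===== PORT B =====
-- rank(name): the job's final output group, 0 … 16 in queue order
def pvRank (name : String) : Int :=
  if PySem.Str.endswith name "-scrape" then 0
  else if PySem.Str.startswith name "netscan" || PySem.Str.startswith name "leak-" ||
      name == "event-scout" || PySem.Str.startswith name "radio-scan" || name == "watchdog" then 1
  else if PySem.Str.startswith name "company-" then
    (if 2 < PySem.Str.count name "-" then 11 else 5) +
      (if PySem.Str.isIn "summary" name then 1 else 0)
  else if PySem.Str.startswith name "career-" then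
    (if 2 < PySem.Str.count name "-" then 13 else 7) +
      (if PySem.Str.isIn "summary" name then 1 else 0)
  else if PySem.Str.startswith name "repo-scan-" || name == "repo-digest" then 16
  else if PySem.Str.startswith name "repo-think-" then
    (if name == "repo-think-summary" then 10 else 9)
  else if PySem.Str.startswith name "repo-" || name == "salary-tracker" then 3
  else if PySem.Str.startswith name "lore-" then 15
  else if PySem.Str.startswith name "academic-" then 2
  else 4

def build_batch_queue_alt (batch_jobs : List (List (String × String))) (weekly_jobs : List (List (String × String))) : List (List (String × String)) :=
  PySem.List.sorted2 batch_jobs (fun j => pvRank (pvName j)) pvName ++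
    PySem.List.sorted weekly_jobs pvName

-- ===== PRECONDITION & SPEC =====
-- Pre_ excludes jobs without a "name" key, on which A raises KeyError.
def Pre_build_batch_queue (batch_jobs : List (List (String × String))) (weekly_jobs : List (List (String × String))) : Prop :=
  (∀ j ∈ batch_jobs, ((⟨j⟩ : PySem.Dict String String).get? "name").isSome = true) ∧
  (∀ j ∈ weekly_jobs, ((⟨j⟩ : PySem.Dict String String).get? "name").isSome = true)
instance (batch_jobs : List (List (String × String))) (weekly_jobs : List (List (String × String))) : Decidable (Pre_build_batch_queue batch_jobs weekly_jobs) := by unfold Pre_build_batch_queue; infer_instance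

def pvWitness_build_batch_queue : (List (List (String × String))) × (List (List (String × String))) :=
  ([[("name", "netscan-1")], [("name", "lore-x")], [("name", "company-a")]], [[("name", "w")]])

def Spec_build_batch_queue (batch_jobs : List (List (String × String))) (weekly_jobs : List (List (String × String))) (out : List (List (String × String))) : Prop := out = build_batch_queue_alt batch_jobs weekly_jobs
instance (batch_jobs : List (List (String × String))) (weekly_jobs : List (List (String × String))) (out : List (List (String × String))) : Decidable (Spec_build_batch_queue batch_jobs weekly_jobs out) := by unfold Spec_build_batch_queue; infer_instance

-- ===== CLAIM =====
def Claim_equal_build_batch_queue : Prop := ∀ (batch_jobs : List (List (String × String))) (weekly_jobs : List (List (String × String))), Dom_build_batch_queue batch_jobs weekly_jobs → Pre_build_batch_queue batch_jobs weekly_jobs → Spec_build_batch_queue batch_jobs weekly_jobs (build_batch_queue batch_jobs weekly_jobs)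

-- ===== LEMMAS AND PROOFS =====

def pvBefN {α : Type} (k : α → String) : α → α → Bool := fun a b => decide (k a < k b)
def pvBef2 {α : Type} (c : α → Int) (k : α → String) : α → α → Bool :=
  fun a b => decide (c a < c b) || (!decide (c b < c a) && decide (k a < k b))

theorem pvInsertBy_nil {α : Type} (bef : α → α → Bool) (x : α) :
    PySem.List.insertBy bef x [] = [x] := rfl
theorem pvInsertBy_cons {α : Type} (bef : α → α → Bool) (x y : α) (ys : List α) :
    PySem.List.insertBy bef x (y :: ys) =
      if bef x y then x :: y :: ys else y :: PySem.List.insertBy bef x ys := rfl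

theorem pvInsertBy_append_not {α : Type} (bef : α → α → Bool) (x : α) (as bs : List α)
    (h : ∀ a ∈ as, bef x a = false) :
    PySem.List.insertBy bef x (as ++ bs) = as ++ PySem.List.insertBy bef x bs := by
  induction as with
  | nil => simp
  | cons a as ih =>
    simp only [List.cons_append, pvInsertBy_cons, h a (by simp)]
    simp only [Bool.false_eq_true, if_false, List.cons.injEq, true_and]
    exact ih (fun a ha => h a (by simp [ha]))

theorem pvInsertBy_all {α : Type} (bef : α → α → Bool) (x : α) (zs : List α)
    (h : ∀ z ∈ zs, bef x z = true) :
    PySem.List.insertBy bef x zs = x :: zs := by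
  cases zs with
  | nil => rfl
  | cons z zs => simp [pvInsertBy_cons, h z (by simp)]

theorem pvInsertBy_append_all {α : Type} (bef : α → α → Bool) (x : α) (as bs : List α)
    (h : ∀ b ∈ bs, bef x b = true) :
    PySem.List.insertBy bef x (as ++ bs) = PySem.List.insertBy bef x as ++ bs := by
  induction as with
  | nil => simp [pvInsertBy_all bef x bs h, pvInsertBy_nil]
  | cons a as ih =>
    by_cases hxa : bef x a = true
    · simp [pvInsertBy_cons, hxa]
    · simp only [List.cons_append, pvInsertBy_cons, hxa, if_false, Bool.false_eq_true]
      simp [ih]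

theorem pvInsertBy_congr {α : Type} (bef1 bef2 : α → α → Bool) (x : α) (ys : List α)
    (h : ∀ y ∈ ys, bef1 x y = bef2 x y) :
    PySem.List.insertBy bef1 x ys = PySem.List.insertBy bef2 x ys := by
  induction ys with
  | nil => rfl
  | cons y ys ih =>
    simp only [pvInsertBy_cons, h y (by simp)]
    rw [ih (fun y hy => h y (by simp [hy]))]

theorem pvSorted_foldl {α : Type} (k : α → String) (l : List α) :
    PySem.List.sorted l k = l.foldl (fun acc x => PySem.List.insertBy (pvBefN k) x acc) [] := rfl

theorem pvSorted_snoc {α : Type} (k : α → String) (l : List α) (x : α) :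
    PySem.List.sorted (l ++ [x]) k = PySem.List.insertBy (pvBefN k) x (PySem.List.sorted l k) := by
  rw [pvSorted_foldl, pvSorted_foldl, List.foldl_append]; rfl

theorem pvSorted2_foldl {α : Type} (c : α → Int) (k : α → String) (l : List α) :
    PySem.List.sorted2 l c k = l.foldl (fun acc x => PySem.List.insertBy (pvBef2 c k) x acc) [] := rfl

theorem pvSorted2_snoc {α : Type} (c : α → Int) (k : α → String) (l : List α) (x : α) :
    PySem.List.sorted2 (l ++ [x]) c k = PySem.List.insertBy (pvBef2 c k) x (PySem.List.sorted2 l c k) := by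
  rw [pvSorted2_foldl, pvSorted2_foldl, List.foldl_append]; rfl

theorem pvFilter_insertBy {α : Type} (k : α → String) (p : α → Bool) (x : α) (s : List α)
    (hs : s.Pairwise (fun a b => k a ≤ k b)) :
    (PySem.List.insertBy (pvBefN k) x s).filter p =
      if p x then PySem.List.insertBy (pvBefN k) x (s.filter p) else s.filter p := by
  induction s with
  | nil =>
    by_cases hp : p x = true <;> simp [pvInsertBy_nil, hp]
  | cons y ys ih =>
    have hy : ∀ z ∈ ys, k y ≤ k z := (List.pairwise_cons.mp hs).1
    have hys := (List.pairwise_cons.mp hs).2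
    by_cases hxy : pvBefN k x y = true
    · -- x goes first
      have hlt : k x < k y := of_decide_eq_true hxy
      rw [pvInsertBy_cons, if_pos hxy]
      by_cases hp : p x = true
      · rw [if_pos hp]
        rw [List.filter_cons_of_pos hp]
        rw [pvInsertBy_all]
        intro z hz
        have hz' : z ∈ y :: ys := List.mem_of_mem_filter hz
        rcases List.mem_cons.mp hz' with h | h
        · subst h; exact hxy
        · exact decide_eq_true (lt_of_lt_of_le hlt (hy z h))
      · rw [if_neg hp, List.filter_cons_of_neg (by simpa using hp)]
    · rw [pvInsertBy_cons, if_neg hxy]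
      by_cases hpy : p y = true
      · rw [List.filter_cons_of_pos hpy, List.filter_cons_of_pos hpy, ih hys]
        by_cases hp : p x = true
        · rw [if_pos hp, if_pos hp, pvInsertBy_cons, if_neg hxy]
        · rw [if_neg hp, if_neg hp]
      · rw [List.filter_cons_of_neg (by simpa using hpy), List.filter_cons_of_neg (by simpa using hpy), ih hys]

theorem pvFilter_sorted {α : Type} (k : α → String) (p : α → Bool) (l : List α) :
    (PySem.List.sorted l k).filter p = PySem.List.sorted (l.filter p) k := by
  induction l using List.reverseRecOn with
  | nil => rfl
  | append_singleton l x ih =>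
    rw [pvSorted_snoc, pvFilter_insertBy k p x _ (PySem.List.sorted_pairwise l k), List.filter_append]
    by_cases hp : p x = true
    · rw [if_pos hp]
      simp only [List.filter_cons, hp, if_pos, List.filter_nil]
      rw [pvSorted_snoc, ih]
    · rw [if_neg hp]
      simp only [List.filter_cons, hp]
      simpa using ih

theorem pvFlatMap_congr {α β : Type} (f g : α → List β) (l : List α)
    (h : ∀ v ∈ l, f v = g v) : l.flatMap f = l.flatMap g := by
  induction l with
  | nil => rfl
  | cons v l ih =>
    simp only [List.flatMap_cons, h v (by simp)]
    rw [ih (fun v hv => h v (by simp [hv]))]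


theorem pvInsert_flatMap {α : Type} (c : α → Int) (k : α → String) (x : α) (vs : List Int)
    (f : Int → List α) (hvs : vs.Pairwise (· < ·)) (hx : c x ∈ vs)
    (hf : ∀ v, ∀ y ∈ f v, c y = v) :
    PySem.List.insertBy (pvBef2 c k) x (vs.flatMap f) =
      vs.flatMap (fun v => if c x == v then PySem.List.insertBy (pvBefN k) x (f v) else f v) := by
  induction vs with
  | nil => simp at hx
  | cons v vs ih =>
    have hv : ∀ w ∈ vs, v < w := (List.pairwise_cons.mp hvs).1
    have hvs' := (List.pairwise_cons.mp hvs).2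
    simp only [List.flatMap_cons]
    by_cases hcx : c x = v
    · have h1 : ∀ y ∈ vs.flatMap f, pvBef2 c k x y = true := by
        intro y hy
        rcases List.mem_flatMap.mp hy with ⟨w, hw, hyw⟩
        have : c y = w := hf w y hyw
        have : c x < c y := by rw [hcx, this]; exact hv w hw
        simp [pvBef2, this]
      rw [pvInsertBy_append_all _ _ _ _ h1]
      have h2 : PySem.List.insertBy (pvBef2 c k) x (f v) = PySem.List.insertBy (pvBefN k) x (f v) := by
        apply pvInsertBy_congr
        intro y hy
        have hcy : c y = v := hf v y hy
        simp [pvBef2, pvBefN, hcy, hcx]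
      rw [h2, if_pos (by simp [hcx])]
      congr 1
      apply pvFlatMap_congr
      intro w hw
      rw [if_neg]
      simp only [beq_iff_eq, hcx]
      exact ne_of_lt (hv w hw)
    · have hx' : c x ∈ vs := by
        rcases List.mem_cons.mp hx with h | h
        · exact absurd h hcx
        · exact h
      have hvcx : v < c x := hv _ hx'
      have h1 : ∀ y ∈ f v, pvBef2 c k x y = false := by
        intro y hy
        have hcy : c y = v := hf v y hy
        have h2 : ¬ (c x < c y) := by rw [hcy]; omega
        have h3 : c y < c x := by rw [hcy]; exact hvcx
        simp [pvBef2, h2, h3]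
      rw [pvInsertBy_append_not _ _ _ _ h1, if_neg (by simp [hcx]), ih hvs' hx']

theorem pvSorted2_flatMap {α : Type} (c : α → Int) (k : α → String) (vs : List Int)
    (hvs : vs.Pairwise (· < ·)) (l : List α) (hl : ∀ x ∈ l, c x ∈ vs) :
    PySem.List.sorted2 l c k =
      vs.flatMap (fun v => PySem.List.sorted (l.filter (fun x => c x == v)) k) := by
  induction l using List.reverseRecOn with
  | nil =>
    rw [show PySem.List.sorted2 ([] : List α) c k = [] from rfl]
    rw [pvFlatMap_congr _ (fun _ => []) vs (by intro v hv; rfl)]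
    simp
  | append_singleton l x ih =>
    rw [pvSorted2_snoc, ih (fun y hy => hl y (by simp [hy]))]
    rw [pvInsert_flatMap c k x vs _ hvs (hl x (by simp))
      (fun v y hy => by
        have := (PySem.List.mem_sorted _ _ _ _).mp hy
        exact beq_iff_eq.mp (List.mem_filter.mp this).2)]
    apply pvFlatMap_congr
    intro v hv
    rw [List.filter_append]
    by_cases hcx : c x = v
    · rw [if_pos (by simp [hcx])]
      simp only [List.filter_cons, hcx, beq_self_eq_true, if_pos, List.filter_nil]
      rw [pvSorted_snoc]
    · rw [if_neg (by simp [hcx])]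
      simp only [List.filter_cons, List.filter_nil]
      rw [if_neg (by simp [hcx])]
      simp

def pvCat (n : String) : Nat :=
  if PySem.Str.endswith n "-scrape" then 0
  else if PySem.Str.startswith n "netscan" || PySem.Str.startswith n "leak-" ||
      n == "event-scout" || PySem.Str.startswith n "radio-scan" || n == "watchdog" then 1
  else if PySem.Str.startswith n "company-" then 2
  else if PySem.Str.startswith n "career-" then 3
  else if PySem.Str.startswith n "repo-scan-" || n == "repo-digest" then 4
  else if PySem.Str.startswith n "repo-think-" then 5
  else if PySem.Str.startswith n "repo-" || n == "salary-tracker" then 6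
  else if PySem.Str.startswith n "lore-" then 7
  else if PySem.Str.startswith n "academic-" then 8
  else 9

def pvQ (i : Nat) : List (String × String) → Bool := fun j => pvCat (pvName j) == i

theorem pvDle (a : Nat) : decide (a ≤ 2) = !decide (2 < a) := by
  by_cases h : 2 < a
  · simp [h, Nat.not_le.mpr h]
  · simp [h, Nat.not_lt.mp h]

-- Bool-atom abstractions of the classification chains (proof helpers)
def pvCatB (b0 b1 b2 b3 b4 b5 b6 b7 b8 : Bool) : Nat :=
  if b0 then 0 else if b1 then 1 else if b2 then 2 else if b3 then 3 else if b4 then 4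
  else if b5 then 5 else if b6 then 6 else if b7 then 7 else if b8 then 8 else 9

def pvClsB (sm gt : Bool) : Int := if sm then 2 else if gt then 1 else 0

def pvRankB (b0 b1 b2 b3 b4 b5 b6 b7 b8 sm gt r : Bool) : Int :=
  if b0 then 0
  else if b1 then 1
  else if b2 then (if gt then 11 else 5) + (if sm then 1 else 0)
  else if b3 then (if gt then 13 else 7) + (if sm then 1 else 0)
  else if b4 then 16
  else if b5 then (if r then 10 else 9)
  else if b6 then 3
  else if b7 then 15
  else if b8 then 2
  else 4

theorem pvCat_eq (n : String) :
    pvCat n = pvCatB (PySem.Str.endswith n "-scrape")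
      (PySem.Str.startswith n "netscan" || PySem.Str.startswith n "leak-" ||
        n == "event-scout" || PySem.Str.startswith n "radio-scan" || n == "watchdog")
      (PySem.Str.startswith n "company-") (PySem.Str.startswith n "career-")
      (PySem.Str.startswith n "repo-scan-" || n == "repo-digest")
      (PySem.Str.startswith n "repo-think-")
      (PySem.Str.startswith n "repo-" || n == "salary-tracker")
      (PySem.Str.startswith n "lore-") (PySem.Str.startswith n "academic-") := rfl

theorem pvClsCC_eq (n : String) :
    pvClsCC n = pvClsB (PySem.Str.isIn "summary" n) (decide (2 < PySem.Str.count n "-")) := by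
  by_cases h : 2 < PySem.Str.count n "-"
  · simp only [decide_eq_true h]; unfold pvClsCC pvClsB; simp only [if_pos h]; rfl
  · simp only [decide_eq_false h]; unfold pvClsCC pvClsB; simp only [if_neg h]; rfl

theorem pvRank_eq (n : String) :
    pvRank n = pvRankB (PySem.Str.endswith n "-scrape")
      (PySem.Str.startswith n "netscan" || PySem.Str.startswith n "leak-" ||
        n == "event-scout" || PySem.Str.startswith n "radio-scan" || n == "watchdog")
      (PySem.Str.startswith n "company-") (PySem.Str.startswith n "career-")
      (PySem.Str.startswith n "repo-scan-" || n == "repo-digest")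
      (PySem.Str.startswith n "repo-think-")
      (PySem.Str.startswith n "repo-" || n == "salary-tracker")
      (PySem.Str.startswith n "lore-") (PySem.Str.startswith n "academic-")
      (PySem.Str.isIn "summary" n) (decide (2 < PySem.Str.count n "-"))
      (n == "repo-think-summary") := by
  by_cases h : 2 < PySem.Str.count n "-"
  · simp only [decide_eq_true h]; unfold pvRank pvRankB; simp only [if_pos h]; rfl
  · simp only [decide_eq_false h]; unfold pvRank pvRankB; simp only [if_neg h]; rfl



theorem pvRoute_foldl (l : List (List (String × String))) (acc : PvBlocks) :
    l.foldl pvRoute acc =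
      ⟨acc.infra ++ l.filter (pvQ 1), acc.scrape ++ l.filter (pvQ 0),
       acc.company ++ l.filter (pvQ 2), acc.career ++ l.filter (pvQ 3),
       acc.repoScan ++ l.filter (pvQ 4), acc.repoThink ++ l.filter (pvQ 5),
       acc.repoOther ++ l.filter (pvQ 6), acc.lore ++ l.filter (pvQ 7),
       acc.academic ++ l.filter (pvQ 8), acc.other ++ l.filter (pvQ 9)⟩ := by
  induction l generalizing acc with
  | nil => simp
  | cons j t ih =>
    rw [List.foldl_cons, ih]
    simp only [pvRoute]
    split_ifs with h1 h2 h3 h4 h5 h6 h7 h8 h9 <;>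
      simp only [pvQ, pvCat_eq, pvCatB, *, Nat.reduceBEq, List.filter_cons,
        List.append_assoc, PvBlocks.mk.injEq, and_self, Bool.false_eq_true,
        beq_self_eq_true, if_true, if_false] <;> simp [*]

def pvSeg (bj : List (List (String × String))) (v : Int) : List (List (String × String)) :=
  PySem.List.sorted (bj.filter (fun j => pvRank (pvName j) == v)) pvName

theorem pvRank_mem (n : String) :
    pvRank n ∈ ([0,1,2,3,4,5,6,7,8,9,10,11,12,13,14,15,16] : List Int) := by
  unfold pvRank; split_ifs <;> decide

theorem pvClsCC_mem (n : String) : pvClsCC n ∈ ([0,1,2] : List Int) := by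
  unfold pvClsCC; split_ifs <;> decide

-- simple buckets: bucket predicate = rank predicate, pointwise
theorem pvN0 (n : String) : (pvCat n == 0) = (pvRank n == 0) := by
  unfold pvCat pvRank; split_ifs <;> decide
theorem pvN1 (n : String) : (pvCat n == 1) = (pvRank n == 1) := by
  unfold pvCat pvRank; split_ifs <;> decide
theorem pvN2 (n : String) : (pvCat n == 8) = (pvRank n == 2) := by
  unfold pvCat pvRank; split_ifs <;> decide
theorem pvN3 (n : String) : (pvCat n == 6) = (pvRank n == 3) := by
  unfold pvCat pvRank; split_ifs <;> decide
theorem pvN4 (n : String) : (pvCat n == 9) = (pvRank n == 4) := by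
  unfold pvCat pvRank; split_ifs <;> decide
theorem pvN15 (n : String) : (pvCat n == 7) = (pvRank n == 15) := by
  unfold pvCat pvRank; split_ifs <;> decide
theorem pvN16 (n : String) : (pvCat n == 4) = (pvRank n == 16) := by
  unfold pvCat pvRank; split_ifs <;> decide

theorem pvSeg_simple (bj : List (List (String × String))) (i : Nat) (v : Int)
    (h : ∀ n, (pvCat n == i) = (pvRank n == v)) :
    PySem.List.sorted (bj.filter (pvQ i)) pvName = pvSeg bj v := by
  unfold pvSeg
  rw [List.filter_congr (fun j _ => by rw [pvQ, h (pvName j)])]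

theorem pvCompany_split (bj : List (List (String × String))) :
    PySem.List.sorted2 (PySem.List.sorted (bj.filter (pvQ 2)) pvName)
      (fun j => pvClsCC (pvName j)) pvName =
    PySem.List.sorted (bj.filter (fun j => pvClsCC (pvName j) == 0 && pvQ 2 j)) pvName ++
    PySem.List.sorted (bj.filter (fun j => pvClsCC (pvName j) == 1 && pvQ 2 j)) pvName ++
    PySem.List.sorted (bj.filter (fun j => pvClsCC (pvName j) == 2 && pvQ 2 j)) pvName := by
  rw [pvSorted2_flatMap _ _ [0,1,2] (by decide) _ (fun x _ => pvClsCC_mem _)]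
  simp only [List.flatMap_cons, List.flatMap_nil, List.append_nil, List.append_assoc]
  rw [pvFilter_sorted, pvFilter_sorted, pvFilter_sorted, PySem.List.sorted_sorted,
    PySem.List.sorted_sorted, PySem.List.sorted_sorted, List.filter_filter, List.filter_filter,
    List.filter_filter]

theorem pvCareer_split (bj : List (List (String × String))) :
    PySem.List.sorted2 (PySem.List.sorted (bj.filter (pvQ 3)) pvName)
      (fun j => pvClsCC (pvName j)) pvName =
    PySem.List.sorted (bj.filter (fun j => pvClsCC (pvName j) == 0 && pvQ 3 j)) pvName ++
    PySem.List.sorted (bj.filter (fun j => pvClsCC (pvName j) == 1 && pvQ 3 j)) pvName ++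
    PySem.List.sorted (bj.filter (fun j => pvClsCC (pvName j) == 2 && pvQ 3 j)) pvName := by
  rw [pvSorted2_flatMap _ _ [0,1,2] (by decide) _ (fun x _ => pvClsCC_mem _)]
  simp only [List.flatMap_cons, List.flatMap_nil, List.append_nil, List.append_assoc]
  rw [pvFilter_sorted, pvFilter_sorted, pvFilter_sorted, PySem.List.sorted_sorted,
    PySem.List.sorted_sorted, PySem.List.sorted_sorted, List.filter_filter, List.filter_filter,
    List.filter_filter]

theorem pvThink_split (bj : List (List (String × String))) :
    PySem.List.sorted2 (PySem.List.sorted (bj.filter (pvQ 5)) pvName)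
      (fun j => if pvName j == "repo-think-summary" then (1 : Int) else 0) pvName =
    PySem.List.sorted (bj.filter (fun j =>
      (if pvName j == "repo-think-summary" then (1 : Int) else 0) == 0 && pvQ 5 j)) pvName ++
    PySem.List.sorted (bj.filter (fun j =>
      (if pvName j == "repo-think-summary" then (1 : Int) else 0) == 1 && pvQ 5 j)) pvName := by
  rw [pvSorted2_flatMap _ _ [0,1] (by decide) _
    (fun x _ => by by_cases h : pvName x == "repo-think-summary" <;> simp [h])]
  simp only [List.flatMap_cons, List.flatMap_nil, List.append_nil]
  rw [pvFilter_sorted, pvFilter_sorted, PySem.List.sorted_sorted, PySem.List.sorted_sorted,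
    List.filter_filter, List.filter_filter]


-- all fourteen composite pointwise identities, over abstract atoms, one kernel evaluation
theorem pvNB : ∀ (b0 b1 b2 b3 b4 b5 b6 b7 b8 sm gt r : Bool),
    ((!gt && (pvClsB sm gt == 0 && pvCatB b0 b1 b2 b3 b4 b5 b6 b7 b8 == 2)) = (pvRankB b0 b1 b2 b3 b4 b5 b6 b7 b8 sm gt r == 5)) ∧
    ((!gt && (pvClsB sm gt == 2 && pvCatB b0 b1 b2 b3 b4 b5 b6 b7 b8 == 2)) = (pvRankB b0 b1 b2 b3 b4 b5 b6 b7 b8 sm gt r == 6)) ∧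
    ((!gt && (pvClsB sm gt == 1 && pvCatB b0 b1 b2 b3 b4 b5 b6 b7 b8 == 2)) = false) ∧
    ((gt && (pvClsB sm gt == 1 && pvCatB b0 b1 b2 b3 b4 b5 b6 b7 b8 == 2)) = (pvRankB b0 b1 b2 b3 b4 b5 b6 b7 b8 sm gt r == 11)) ∧
    ((gt && (pvClsB sm gt == 2 && pvCatB b0 b1 b2 b3 b4 b5 b6 b7 b8 == 2)) = (pvRankB b0 b1 b2 b3 b4 b5 b6 b7 b8 sm gt r == 12)) ∧
    ((gt && (pvClsB sm gt == 0 && pvCatB b0 b1 b2 b3 b4 b5 b6 b7 b8 == 2)) = false) ∧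
    ((!gt && (pvClsB sm gt == 0 && pvCatB b0 b1 b2 b3 b4 b5 b6 b7 b8 == 3)) = (pvRankB b0 b1 b2 b3 b4 b5 b6 b7 b8 sm gt r == 7)) ∧
    ((!gt && (pvClsB sm gt == 2 && pvCatB b0 b1 b2 b3 b4 b5 b6 b7 b8 == 3)) = (pvRankB b0 b1 b2 b3 b4 b5 b6 b7 b8 sm gt r == 8)) ∧
    ((!gt && (pvClsB sm gt == 1 && pvCatB b0 b1 b2 b3 b4 b5 b6 b7 b8 == 3)) = false) ∧
    ((gt && (pvClsB sm gt == 1 && pvCatB b0 b1 b2 b3 b4 b5 b6 b7 b8 == 3)) = (pvRankB b0 b1 b2 b3 b4 b5 b6 b7 b8 sm gt r == 13)) ∧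
    ((gt && (pvClsB sm gt == 2 && pvCatB b0 b1 b2 b3 b4 b5 b6 b7 b8 == 3)) = (pvRankB b0 b1 b2 b3 b4 b5 b6 b7 b8 sm gt r == 14)) ∧
    ((gt && (pvClsB sm gt == 0 && pvCatB b0 b1 b2 b3 b4 b5 b6 b7 b8 == 3)) = false) ∧
    (((if r then (1 : Int) else 0) == 0 && pvCatB b0 b1 b2 b3 b4 b5 b6 b7 b8 == 5) = (pvRankB b0 b1 b2 b3 b4 b5 b6 b7 b8 sm gt r == 9)) ∧
    (((if r then (1 : Int) else 0) == 1 && pvCatB b0 b1 b2 b3 b4 b5 b6 b7 b8 == 5) = (pvRankB b0 b1 b2 b3 b4 b5 b6 b7 b8 sm gt r == 10)) := by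
  decide

theorem pvN5 (n : String) :
    (decide (PySem.Str.count n "-" ≤ 2) && (pvClsCC n == 0 && pvCat n == 2)) = (pvRank n == 5) := by
  simp only [pvDle, pvClsCC_eq, pvCat_eq, pvRank_eq]
  exact (pvNB (PySem.Str.endswith n "-scrape")
      (PySem.Str.startswith n "netscan" || PySem.Str.startswith n "leak-" ||
        n == "event-scout" || PySem.Str.startswith n "radio-scan" || n == "watchdog")
      (PySem.Str.startswith n "company-") (PySem.Str.startswith n "career-")
      (PySem.Str.startswith n "repo-scan-" || n == "repo-digest")
      (PySem.Str.startswith n "repo-think-")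
      (PySem.Str.startswith n "repo-" || n == "salary-tracker")
      (PySem.Str.startswith n "lore-") (PySem.Str.startswith n "academic-")
      (PySem.Str.isIn "summary" n) (decide (2 < PySem.Str.count n "-"))
      (n == "repo-think-summary")).1

theorem pvN6 (n : String) :
    (decide (PySem.Str.count n "-" ≤ 2) && (pvClsCC n == 2 && pvCat n == 2)) = (pvRank n == 6) := by
  simp only [pvDle, pvClsCC_eq, pvCat_eq, pvRank_eq]
  exact (pvNB (PySem.Str.endswith n "-scrape")
      (PySem.Str.startswith n "netscan" || PySem.Str.startswith n "leak-" ||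
        n == "event-scout" || PySem.Str.startswith n "radio-scan" || n == "watchdog")
      (PySem.Str.startswith n "company-") (PySem.Str.startswith n "career-")
      (PySem.Str.startswith n "repo-scan-" || n == "repo-digest")
      (PySem.Str.startswith n "repo-think-")
      (PySem.Str.startswith n "repo-" || n == "salary-tracker")
      (PySem.Str.startswith n "lore-") (PySem.Str.startswith n "academic-")
      (PySem.Str.isIn "summary" n) (decide (2 < PySem.Str.count n "-"))
      (n == "repo-think-summary")).2.1

theorem pvN5d (n : String) :
    (decide (PySem.Str.count n "-" ≤ 2) && (pvClsCC n == 1 && pvCat n == 2)) = (false) := by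
  simp only [pvDle, pvClsCC_eq, pvCat_eq]
  exact (pvNB (PySem.Str.endswith n "-scrape")
      (PySem.Str.startswith n "netscan" || PySem.Str.startswith n "leak-" ||
        n == "event-scout" || PySem.Str.startswith n "radio-scan" || n == "watchdog")
      (PySem.Str.startswith n "company-") (PySem.Str.startswith n "career-")
      (PySem.Str.startswith n "repo-scan-" || n == "repo-digest")
      (PySem.Str.startswith n "repo-think-")
      (PySem.Str.startswith n "repo-" || n == "salary-tracker")
      (PySem.Str.startswith n "lore-") (PySem.Str.startswith n "academic-")
      (PySem.Str.isIn "summary" n) (decide (2 < PySem.Str.count n "-"))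
      (n == "repo-think-summary")).2.2.1

theorem pvN11 (n : String) :
    (decide (2 < PySem.Str.count n "-") && (pvClsCC n == 1 && pvCat n == 2)) = (pvRank n == 11) := by
  simp only [pvClsCC_eq, pvCat_eq, pvRank_eq]
  exact (pvNB (PySem.Str.endswith n "-scrape")
      (PySem.Str.startswith n "netscan" || PySem.Str.startswith n "leak-" ||
        n == "event-scout" || PySem.Str.startswith n "radio-scan" || n == "watchdog")
      (PySem.Str.startswith n "company-") (PySem.Str.startswith n "career-")
      (PySem.Str.startswith n "repo-scan-" || n == "repo-digest")
      (PySem.Str.startswith n "repo-think-")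
      (PySem.Str.startswith n "repo-" || n == "salary-tracker")
      (PySem.Str.startswith n "lore-") (PySem.Str.startswith n "academic-")
      (PySem.Str.isIn "summary" n) (decide (2 < PySem.Str.count n "-"))
      (n == "repo-think-summary")).2.2.2.1

theorem pvN12 (n : String) :
    (decide (2 < PySem.Str.count n "-") && (pvClsCC n == 2 && pvCat n == 2)) = (pvRank n == 12) := by
  simp only [pvClsCC_eq, pvCat_eq, pvRank_eq]
  exact (pvNB (PySem.Str.endswith n "-scrape")
      (PySem.Str.startswith n "netscan" || PySem.Str.startswith n "leak-" ||
        n == "event-scout" || PySem.Str.startswith n "radio-scan" || n == "watchdog")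
      (PySem.Str.startswith n "company-") (PySem.Str.startswith n "career-")
      (PySem.Str.startswith n "repo-scan-" || n == "repo-digest")
      (PySem.Str.startswith n "repo-think-")
      (PySem.Str.startswith n "repo-" || n == "salary-tracker")
      (PySem.Str.startswith n "lore-") (PySem.Str.startswith n "academic-")
      (PySem.Str.isIn "summary" n) (decide (2 < PySem.Str.count n "-"))
      (n == "repo-think-summary")).2.2.2.2.1

theorem pvN11d (n : String) :
    (decide (2 < PySem.Str.count n "-") && (pvClsCC n == 0 && pvCat n == 2)) = (false) := by
  simp only [pvClsCC_eq, pvCat_eq]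
  exact (pvNB (PySem.Str.endswith n "-scrape")
      (PySem.Str.startswith n "netscan" || PySem.Str.startswith n "leak-" ||
        n == "event-scout" || PySem.Str.startswith n "radio-scan" || n == "watchdog")
      (PySem.Str.startswith n "company-") (PySem.Str.startswith n "career-")
      (PySem.Str.startswith n "repo-scan-" || n == "repo-digest")
      (PySem.Str.startswith n "repo-think-")
      (PySem.Str.startswith n "repo-" || n == "salary-tracker")
      (PySem.Str.startswith n "lore-") (PySem.Str.startswith n "academic-")
      (PySem.Str.isIn "summary" n) (decide (2 < PySem.Str.count n "-"))
      (n == "repo-think-summary")).2.2.2.2.2.1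

theorem pvN7 (n : String) :
    ((decide (PySem.Str.count n "-" ≤ 2) || n == "career-scan") && (pvClsCC n == 0 && pvCat n == 3)) = (pvRank n == 7) := by
  by_cases hs : n = "career-scan"
  · subst hs; decide
  · have hsf : (n == "career-scan") = false := by simp [hs]
    simp only [hsf, Bool.or_false, pvDle, pvClsCC_eq, pvCat_eq, pvRank_eq]
    exact (pvNB (PySem.Str.endswith n "-scrape")
      (PySem.Str.startswith n "netscan" || PySem.Str.startswith n "leak-" ||
        n == "event-scout" || PySem.Str.startswith n "radio-scan" || n == "watchdog")
      (PySem.Str.startswith n "company-") (PySem.Str.startswith n "career-")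
      (PySem.Str.startswith n "repo-scan-" || n == "repo-digest")
      (PySem.Str.startswith n "repo-think-")
      (PySem.Str.startswith n "repo-" || n == "salary-tracker")
      (PySem.Str.startswith n "lore-") (PySem.Str.startswith n "academic-")
      (PySem.Str.isIn "summary" n) (decide (2 < PySem.Str.count n "-"))
      (n == "repo-think-summary")).2.2.2.2.2.2.1

theorem pvN8 (n : String) :
    ((decide (PySem.Str.count n "-" ≤ 2) || n == "career-scan") && (pvClsCC n == 2 && pvCat n == 3)) = (pvRank n == 8) := by
  by_cases hs : n = "career-scan"
  · subst hs; decide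
  · have hsf : (n == "career-scan") = false := by simp [hs]
    simp only [hsf, Bool.or_false, pvDle, pvClsCC_eq, pvCat_eq, pvRank_eq]
    exact (pvNB (PySem.Str.endswith n "-scrape")
      (PySem.Str.startswith n "netscan" || PySem.Str.startswith n "leak-" ||
        n == "event-scout" || PySem.Str.startswith n "radio-scan" || n == "watchdog")
      (PySem.Str.startswith n "company-") (PySem.Str.startswith n "career-")
      (PySem.Str.startswith n "repo-scan-" || n == "repo-digest")
      (PySem.Str.startswith n "repo-think-")
      (PySem.Str.startswith n "repo-" || n == "salary-tracker")
      (PySem.Str.startswith n "lore-") (PySem.Str.startswith n "academic-")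
      (PySem.Str.isIn "summary" n) (decide (2 < PySem.Str.count n "-"))
      (n == "repo-think-summary")).2.2.2.2.2.2.2.1

theorem pvN7d (n : String) :
    ((decide (PySem.Str.count n "-" ≤ 2) || n == "career-scan") && (pvClsCC n == 1 && pvCat n == 3)) = (false) := by
  by_cases hs : n = "career-scan"
  · subst hs; decide
  · have hsf : (n == "career-scan") = false := by simp [hs]
    simp only [hsf, Bool.or_false, pvDle, pvClsCC_eq, pvCat_eq]
    exact (pvNB (PySem.Str.endswith n "-scrape")
      (PySem.Str.startswith n "netscan" || PySem.Str.startswith n "leak-" ||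
        n == "event-scout" || PySem.Str.startswith n "radio-scan" || n == "watchdog")
      (PySem.Str.startswith n "company-") (PySem.Str.startswith n "career-")
      (PySem.Str.startswith n "repo-scan-" || n == "repo-digest")
      (PySem.Str.startswith n "repo-think-")
      (PySem.Str.startswith n "repo-" || n == "salary-tracker")
      (PySem.Str.startswith n "lore-") (PySem.Str.startswith n "academic-")
      (PySem.Str.isIn "summary" n) (decide (2 < PySem.Str.count n "-"))
      (n == "repo-think-summary")).2.2.2.2.2.2.2.2.1

theorem pvN13 (n : String) :
    (decide (2 < PySem.Str.count n "-") && (pvClsCC n == 1 && pvCat n == 3)) = (pvRank n == 13) := by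
  simp only [pvClsCC_eq, pvCat_eq, pvRank_eq]
  exact (pvNB (PySem.Str.endswith n "-scrape")
      (PySem.Str.startswith n "netscan" || PySem.Str.startswith n "leak-" ||
        n == "event-scout" || PySem.Str.startswith n "radio-scan" || n == "watchdog")
      (PySem.Str.startswith n "company-") (PySem.Str.startswith n "career-")
      (PySem.Str.startswith n "repo-scan-" || n == "repo-digest")
      (PySem.Str.startswith n "repo-think-")
      (PySem.Str.startswith n "repo-" || n == "salary-tracker")
      (PySem.Str.startswith n "lore-") (PySem.Str.startswith n "academic-")
      (PySem.Str.isIn "summary" n) (decide (2 < PySem.Str.count n "-"))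
      (n == "repo-think-summary")).2.2.2.2.2.2.2.2.2.1

theorem pvN14 (n : String) :
    (decide (2 < PySem.Str.count n "-") && (pvClsCC n == 2 && pvCat n == 3)) = (pvRank n == 14) := by
  simp only [pvClsCC_eq, pvCat_eq, pvRank_eq]
  exact (pvNB (PySem.Str.endswith n "-scrape")
      (PySem.Str.startswith n "netscan" || PySem.Str.startswith n "leak-" ||
        n == "event-scout" || PySem.Str.startswith n "radio-scan" || n == "watchdog")
      (PySem.Str.startswith n "company-") (PySem.Str.startswith n "career-")
      (PySem.Str.startswith n "repo-scan-" || n == "repo-digest")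
      (PySem.Str.startswith n "repo-think-")
      (PySem.Str.startswith n "repo-" || n == "salary-tracker")
      (PySem.Str.startswith n "lore-") (PySem.Str.startswith n "academic-")
      (PySem.Str.isIn "summary" n) (decide (2 < PySem.Str.count n "-"))
      (n == "repo-think-summary")).2.2.2.2.2.2.2.2.2.2.1

theorem pvN13d (n : String) :
    (decide (2 < PySem.Str.count n "-") && (pvClsCC n == 0 && pvCat n == 3)) = (false) := by
  simp only [pvClsCC_eq, pvCat_eq]
  exact (pvNB (PySem.Str.endswith n "-scrape")
      (PySem.Str.startswith n "netscan" || PySem.Str.startswith n "leak-" ||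
        n == "event-scout" || PySem.Str.startswith n "radio-scan" || n == "watchdog")
      (PySem.Str.startswith n "company-") (PySem.Str.startswith n "career-")
      (PySem.Str.startswith n "repo-scan-" || n == "repo-digest")
      (PySem.Str.startswith n "repo-think-")
      (PySem.Str.startswith n "repo-" || n == "salary-tracker")
      (PySem.Str.startswith n "lore-") (PySem.Str.startswith n "academic-")
      (PySem.Str.isIn "summary" n) (decide (2 < PySem.Str.count n "-"))
      (n == "repo-think-summary")).2.2.2.2.2.2.2.2.2.2.2.1

theorem pvN9 (n : String) :
    ((if n == "repo-think-summary" then (1 : Int) else 0) == 0 && pvCat n == 5) = (pvRank n == 9) := by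
  simp only [pvCat_eq, pvRank_eq]
  exact (pvNB (PySem.Str.endswith n "-scrape")
      (PySem.Str.startswith n "netscan" || PySem.Str.startswith n "leak-" ||
        n == "event-scout" || PySem.Str.startswith n "radio-scan" || n == "watchdog")
      (PySem.Str.startswith n "company-") (PySem.Str.startswith n "career-")
      (PySem.Str.startswith n "repo-scan-" || n == "repo-digest")
      (PySem.Str.startswith n "repo-think-")
      (PySem.Str.startswith n "repo-" || n == "salary-tracker")
      (PySem.Str.startswith n "lore-") (PySem.Str.startswith n "academic-")
      (PySem.Str.isIn "summary" n) (decide (2 < PySem.Str.count n "-"))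
      (n == "repo-think-summary")).2.2.2.2.2.2.2.2.2.2.2.2.1

theorem pvN10 (n : String) :
    ((if n == "repo-think-summary" then (1 : Int) else 0) == 1 && pvCat n == 5) = (pvRank n == 10) := by
  simp only [pvCat_eq, pvRank_eq]
  exact (pvNB (PySem.Str.endswith n "-scrape")
      (PySem.Str.startswith n "netscan" || PySem.Str.startswith n "leak-" ||
        n == "event-scout" || PySem.Str.startswith n "radio-scan" || n == "watchdog")
      (PySem.Str.startswith n "company-") (PySem.Str.startswith n "career-")
      (PySem.Str.startswith n "repo-scan-" || n == "repo-digest")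
      (PySem.Str.startswith n "repo-think-")
      (PySem.Str.startswith n "repo-" || n == "salary-tracker")
      (PySem.Str.startswith n "lore-") (PySem.Str.startswith n "academic-")
      (PySem.Str.isIn "summary" n) (decide (2 < PySem.Str.count n "-"))
      (n == "repo-think-summary")).2.2.2.2.2.2.2.2.2.2.2.2.2


theorem pvSegN5 (bj : List (List (String × String))) :
    PySem.List.sorted (bj.filter (fun j => decide (PySem.Str.count (pvName j) "-" ≤ 2) && (pvClsCC (pvName j) == 0 && pvQ 2 j))) pvName = pvSeg bj 5 := by
  unfold pvSeg
  exact congrArg (fun l => PySem.List.sorted l pvName)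
    (List.filter_congr (fun j _ => by simp only [pvQ]; exact pvN5 (pvName j)))

theorem pvSegN6 (bj : List (List (String × String))) :
    PySem.List.sorted (bj.filter (fun j => decide (PySem.Str.count (pvName j) "-" ≤ 2) && (pvClsCC (pvName j) == 2 && pvQ 2 j))) pvName = pvSeg bj 6 := by
  unfold pvSeg
  exact congrArg (fun l => PySem.List.sorted l pvName)
    (List.filter_congr (fun j _ => by simp only [pvQ]; exact pvN6 (pvName j)))

theorem pvSegN11 (bj : List (List (String × String))) :
    PySem.List.sorted (bj.filter (fun j => decide (2 < PySem.Str.count (pvName j) "-") && (pvClsCC (pvName j) == 1 && pvQ 2 j))) pvName = pvSeg bj 11 := by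
  unfold pvSeg
  exact congrArg (fun l => PySem.List.sorted l pvName)
    (List.filter_congr (fun j _ => by simp only [pvQ]; exact pvN11 (pvName j)))

theorem pvSegN12 (bj : List (List (String × String))) :
    PySem.List.sorted (bj.filter (fun j => decide (2 < PySem.Str.count (pvName j) "-") && (pvClsCC (pvName j) == 2 && pvQ 2 j))) pvName = pvSeg bj 12 := by
  unfold pvSeg
  exact congrArg (fun l => PySem.List.sorted l pvName)
    (List.filter_congr (fun j _ => by simp only [pvQ]; exact pvN12 (pvName j)))

theorem pvSegN7 (bj : List (List (String × String))) :
    PySem.List.sorted (bj.filter (fun j => (decide (PySem.Str.count (pvName j) "-" ≤ 2) || pvName j == "career-scan") && (pvClsCC (pvName j) == 0 && pvQ 3 j))) pvName = pvSeg bj 7 := by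
  unfold pvSeg
  exact congrArg (fun l => PySem.List.sorted l pvName)
    (List.filter_congr (fun j _ => by simp only [pvQ]; exact pvN7 (pvName j)))

theorem pvSegN8 (bj : List (List (String × String))) :
    PySem.List.sorted (bj.filter (fun j => (decide (PySem.Str.count (pvName j) "-" ≤ 2) || pvName j == "career-scan") && (pvClsCC (pvName j) == 2 && pvQ 3 j))) pvName = pvSeg bj 8 := by
  unfold pvSeg
  exact congrArg (fun l => PySem.List.sorted l pvName)
    (List.filter_congr (fun j _ => by simp only [pvQ]; exact pvN8 (pvName j)))

theorem pvSegN13 (bj : List (List (String × String))) :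
    PySem.List.sorted (bj.filter (fun j => decide (2 < PySem.Str.count (pvName j) "-") && (pvClsCC (pvName j) == 1 && pvQ 3 j))) pvName = pvSeg bj 13 := by
  unfold pvSeg
  exact congrArg (fun l => PySem.List.sorted l pvName)
    (List.filter_congr (fun j _ => by simp only [pvQ]; exact pvN13 (pvName j)))

theorem pvSegN14 (bj : List (List (String × String))) :
    PySem.List.sorted (bj.filter (fun j => decide (2 < PySem.Str.count (pvName j) "-") && (pvClsCC (pvName j) == 2 && pvQ 3 j))) pvName = pvSeg bj 14 := by
  unfold pvSeg
  exact congrArg (fun l => PySem.List.sorted l pvName)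
    (List.filter_congr (fun j _ => by simp only [pvQ]; exact pvN14 (pvName j)))

theorem pvSegN9 (bj : List (List (String × String))) :
    PySem.List.sorted (bj.filter (fun j => (if pvName j == "repo-think-summary" then (1 : Int) else 0) == 0 && pvQ 5 j)) pvName = pvSeg bj 9 := by
  unfold pvSeg
  exact congrArg (fun l => PySem.List.sorted l pvName)
    (List.filter_congr (fun j _ => by simp only [pvQ]; exact pvN9 (pvName j)))

theorem pvSegN10 (bj : List (List (String × String))) :
    PySem.List.sorted (bj.filter (fun j => (if pvName j == "repo-think-summary" then (1 : Int) else 0) == 1 && pvQ 5 j)) pvName = pvSeg bj 10 := by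
  unfold pvSeg
  exact congrArg (fun l => PySem.List.sorted l pvName)
    (List.filter_congr (fun j _ => by simp only [pvQ]; exact pvN10 (pvName j)))

theorem pvSegD5 (bj : List (List (String × String))) :
    PySem.List.sorted (bj.filter (fun j => decide (PySem.Str.count (pvName j) "-" ≤ 2) && (pvClsCC (pvName j) == 1 && pvQ 2 j))) pvName = [] := by
  rw [List.filter_congr (fun j _ => by simp only [pvQ]; exact pvN5d (pvName j))]
  rw [List.filter_false]
  rfl

theorem pvSegD11 (bj : List (List (String × String))) :
    PySem.List.sorted (bj.filter (fun j => decide (2 < PySem.Str.count (pvName j) "-") && (pvClsCC (pvName j) == 0 && pvQ 2 j))) pvName = [] := by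
  rw [List.filter_congr (fun j _ => by simp only [pvQ]; exact pvN11d (pvName j))]
  rw [List.filter_false]
  rfl

theorem pvSegD7 (bj : List (List (String × String))) :
    PySem.List.sorted (bj.filter (fun j => (decide (PySem.Str.count (pvName j) "-" ≤ 2) || pvName j == "career-scan") && (pvClsCC (pvName j) == 1 && pvQ 3 j))) pvName = [] := by
  rw [List.filter_congr (fun j _ => by simp only [pvQ]; exact pvN7d (pvName j))]
  rw [List.filter_false]
  rfl

theorem pvSegD13 (bj : List (List (String × String))) :
    PySem.List.sorted (bj.filter (fun j => decide (2 < PySem.Str.count (pvName j) "-") && (pvClsCC (pvName j) == 0 && pvQ 3 j))) pvName = [] := by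
  rw [List.filter_congr (fun j _ => by simp only [pvQ]; exact pvN13d (pvName j))]
  rw [List.filter_false]
  rfl

theorem pvMain (bj wj : List (List (String × String))) :
    build_batch_queue bj wj = build_batch_queue_alt bj wj := by
  simp only [build_batch_queue, build_batch_queue_alt]
  rw [pvRoute_foldl]
  simp only [List.nil_append]
  rw [pvCompany_split, pvCareer_split, pvThink_split]
  rw [pvSorted2_flatMap _ _ [0,1,2,3,4,5,6,7,8,9,10,11,12,13,14,15,16] (by decide) bj
    (fun x _ => pvRank_mem (pvName x))]
  simp only [List.flatMap_cons, List.flatMap_nil, List.append_nil, List.filter_append,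
    pvFilter_sorted, List.filter_filter]
  rw [pvSeg_simple bj 0 0 pvN0, pvSeg_simple bj 1 1 pvN1, pvSeg_simple bj 8 2 pvN2,
    pvSeg_simple bj 6 3 pvN3, pvSeg_simple bj 9 4 pvN4, pvSeg_simple bj 7 15 pvN15,
    pvSeg_simple bj 4 16 pvN16]
  rw [pvSegN5 bj, pvSegN6 bj, pvSegD5 bj, pvSegN11 bj, pvSegN12 bj, pvSegD11 bj,
    pvSegN7 bj, pvSegN8 bj, pvSegD7 bj, pvSegN13 bj, pvSegN14 bj, pvSegD13 bj,
    pvSegN9 bj, pvSegN10 bj]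
  simp only [pvSeg, List.append_assoc, List.append_nil, List.nil_append]

-- ===== VERDICT =====
theorem build_batch_queue_spec : Claim_equal_build_batch_queue := by
  intro bj wj _ _
  unfold Spec_build_batch_queue
  exact pvMain bj wj
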